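-- pv_equiv track=rewrite | github.com/GDBryant/cornucopia | scripts/convert.py | check_make_list_into_text
-- ===== SOURCE A (Python) =====
-- from typing import List, Dict, Tuple, Any
-- from operator import itemgetter
-- from itertools import groupby
--
-- def check_make_list_into_text(var: List[str], group_numbers: bool = True) -> str:
--     if isinstance(var, list):
--         if group_numbers:
--             var = group_number_ranges(var)
--         text_output = ", ".join(str(s) for s in list(var))
--         if len(text_output.strip()) == 0:
--             text_output = " - "
--         return text_output
--     else:
--         return str(var)
--
-- def group_number_ranges(data: List[str]) -> List[str]:
--     if len(data) < 2 or len([s for s in data if not s.isnumeric()]):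
--         return data
--     list_ranges: List[str] = []
--     data_numbers = [int(s) for s in data]
--     for k, g in groupby(enumerate(data_numbers), lambda x: x[0] - x[1]):
--         group: List[int] = list(map(itemgetter(1), g))
--         group = list(map(int, group))
--         if group[0] == group[-1]:
--             list_ranges.append(str(group[0]))
--         else:
--             list_ranges.append(str(group[0]) + "-" + str(group[-1]))
--     return list_ranges
-- ===== SOURCE B (Python) =====
-- def check_make_list_into_text(var, group_numbers: bool = True) -> str:
--     if not isinstance(var, list):
--         return str(var)
--     items = var
--     if group_numbers and len(var) >= 2 and all(s.isnumeric() for s in var):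
--         nums = [int(s) for s in var]
--         items = []
--         start = prev = nums[0]
--         for n in nums[1:]:
--             if n == prev + 1:
--                 prev = n
--             else:
--                 items.append(str(start) if start == prev else str(start) + "-" + str(prev))
--                 start = prev = n
--         items.append(str(start) if start == prev else str(start) + "-" + str(prev))
--     text = ", ".join(str(s) for s in items)
--     return text if text.strip() else " - "
-- ===== Notes on version B (the rewrite author's own statement) =====
-- stated objective: simpler
-- what changed: Replaces the groupby(enumerate, index-minus-value) trick (which materialises each group as a list and re-maps it) with a single explicit pass that carries only the current run's start and previous value and flushes a run when consecutiveness breaks.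
import Mathlib
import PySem

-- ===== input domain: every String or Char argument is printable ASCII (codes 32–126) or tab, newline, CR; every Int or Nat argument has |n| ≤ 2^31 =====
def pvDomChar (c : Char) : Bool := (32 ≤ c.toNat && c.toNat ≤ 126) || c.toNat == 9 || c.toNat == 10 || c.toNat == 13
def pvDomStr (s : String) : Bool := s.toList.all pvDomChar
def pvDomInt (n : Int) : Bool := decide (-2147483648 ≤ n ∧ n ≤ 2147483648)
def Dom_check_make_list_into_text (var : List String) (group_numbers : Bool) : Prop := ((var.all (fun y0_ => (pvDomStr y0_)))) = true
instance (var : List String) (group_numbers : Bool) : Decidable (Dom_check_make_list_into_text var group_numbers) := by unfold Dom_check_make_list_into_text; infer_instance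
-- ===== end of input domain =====

-- B replaces A's groupby(enumerate, index-minus-value) range grouping by a single pass
-- that carries only the current run's start and previous value (objective: simpler).

-- ===== PORT A =====
-- groupby(enumerate(nums), λ(i,v). i-v): adjacent pairs with equal key i-v fall in one
-- group; a group is kept as (head, tail) so group[0]/group[-1] are head / tail's last.
def pvGroupAdjA : List (Int × Int) → List ((Int × Int) × List (Int × Int))
  | [] => []
  | p :: ps =>
    match pvGroupAdjA ps with
    | [] => [(p, [])]
    | (q, t) :: rest =>
      if p.1 - p.2 = q.1 - q.2 then (p, q :: t) :: rest else (p, []) :: (q, t) :: rest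

-- group[0] == group[-1] → str(group[0]), else str(group[0]) + "-" + str(group[-1])
def pvRenderGroupA (g : (Int × Int) × List (Int × Int)) : String :=
  let first := g.1.2
  let last := (g.2.getLastD g.1).2
  if first = last then PySem.Int.toStr first
  else PySem.Int.toStr first ++ "-" ++ PySem.Int.toStr last

-- s.isnumeric() ported as PySem.Str.strIsdigit: exact on the ASCII domain (no ASCII
-- character is numeric without being a digit).  int(s) via ofStr?; the guard ensures
-- every s is a nonempty digit string, so the parse always succeeds (.getD 0 unused).
def pvGroupNumberRanges (data : List String) : List String :=
  if data.length < 2 ∨ (data.filter (fun s => !PySem.Str.strIsdigit s)).length ≠ 0 then data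
  else
    let nums := data.map (fun s => (PySem.Int.ofStr? s).getD 0)
    (pvGroupAdjA (PySem.List.enumerate nums 0)).map pvRenderGroupA

def check_make_list_into_text (var : List String) (group_numbers : Bool) : String :=
  let v := if group_numbers then pvGroupNumberRanges var else var
  let text_output := PySem.Str.join ", " v
  if PySem.Str.len (PySem.Str.strip text_output) = 0 then " - " else text_output

-- ===== PORT B =====
def pvFlushB (start prev : Int) : String :=
  if start = prev then PySem.Int.toStr start
  else PySem.Int.toStr start ++ "-" ++ PySem.Int.toStr prev

-- one pass over the remaining numbers, carrying the current run's start and prev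
def pvRunsB (start prev : Int) : List Int → List String
  | [] => [pvFlushB start prev]
  | n :: rest =>
    if n = prev + 1 then pvRunsB start n rest
    else pvFlushB start prev :: pvRunsB n n rest

def check_make_list_into_text_alt (var : List String) (group_numbers : Bool) : String :=
  let items :=
    if group_numbers && decide (2 ≤ var.length) && var.all PySem.Str.strIsdigit then
      match var.map (fun s => (PySem.Int.ofStr? s).getD 0) with
      | [] => ([] : List String)
      | x :: rest => pvRunsB x x rest
    else var
  let text := PySem.Str.join ", " items
  if PySem.Str.strip text ≠ "" then text else " - "

-- ===== PRECONDITION & SPEC =====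
def Spec_check_make_list_into_text (var : List String) (group_numbers : Bool) (out : String) : Prop := out = check_make_list_into_text_alt var group_numbers
instance (var : List String) (group_numbers : Bool) (out : String) : Decidable (Spec_check_make_list_into_text var group_numbers out) := by unfold Spec_check_make_list_into_text; infer_instance

-- ===== CLAIM (what is proved, stated in full; the proofs are below) =====
def Claim_equal_check_make_list_into_text : Prop := ∀ (var : List String) (group_numbers : Bool), Dom_check_make_list_into_text var group_numbers → Spec_check_make_list_into_text var group_numbers (check_make_list_into_text var group_numbers)

-- ===== LEMMAS AND PROOFS =====

def pvMapRender (gs : List ((Int × Int) × List (Int × Int))) : List String :=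
  gs.map pvRenderGroupA

-- A's rendering of the groups still ahead, given that the current run reaches start..prev
def pvFlushInto (start prev : Int) (gs : List ((Int × Int) × List (Int × Int))) : List String :=
  match gs with
  | [] => [pvFlushB start prev]
  | (h, t) :: rest =>
    if h.2 = prev + 1 then pvFlushB start ((t.getLastD h).2) :: pvMapRender rest
    else pvFlushB start prev :: pvMapRender ((h, t) :: rest)

theorem getLastD_cons' {α : Type} (a b : α) (l : List α) :
    (a :: l).getLastD b = l.getLastD a := by
  cases l <;> rfl

theorem groupAdjA_cons (e : Int × Int) (es : List (Int × Int)) :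
    ∃ t rest, pvGroupAdjA (e :: es) = (e, t) :: rest := by
  show ∃ t rest,
    (match pvGroupAdjA es with
     | [] => [(e, [])]
     | (q, t) :: rest =>
       if e.1 - e.2 = q.1 - q.2 then (e, q :: t) :: rest else (e, []) :: (q, t) :: rest) =
    (e, t) :: rest
  cases h : pvGroupAdjA es with
  | nil => exact ⟨[], [], rfl⟩
  | cons g rest =>
    obtain ⟨q, t⟩ := g
    by_cases hk : e.1 - e.2 = q.1 - q.2 <;> simp [hk]

theorem render_eq_flush (h : Int × Int) (t : List (Int × Int)) :
    pvRenderGroupA (h, t) = pvFlushB h.2 ((t.getLastD h).2) := by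
  simp [pvRenderGroupA, pvFlushB]

theorem groupAdjA_cons_cons (i v : Int) (e : Int × Int) (es : List (Int × Int))
    (t : List (Int × Int)) (rest : List ((Int × Int) × List (Int × Int)))
    (h : pvGroupAdjA (e :: es) = (e, t) :: rest) :
    pvGroupAdjA ((i, v) :: e :: es) =
      (if (i : Int) - v = e.1 - e.2 then ((i, v), e :: t) :: rest
       else ((i, v), []) :: (e, t) :: rest) := by
  show (match pvGroupAdjA (e :: es) with
        | [] => [((i, v), [])]
        | (q, t) :: rest =>
          if (i : Int) - v = q.1 - q.2 then ((i, v), q :: t) :: rest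
          else ((i, v), []) :: (q, t) :: rest) = _
  rw [h]

-- lemma N: mapRender of A's grouping of (i,v)::enum xs (i+1) = flushInto v v (grouping of the tail)
theorem mapRender_groupAdj_cons (xs : List Int) (i v : Int) :
    pvMapRender (pvGroupAdjA ((i, v) :: PySem.List.enumerate xs (i + 1))) =
      pvFlushInto v v (pvGroupAdjA (PySem.List.enumerate xs (i + 1))) := by
  cases xs with
  | nil =>
    rw [PySem.List.enumerate_nil]
    show [pvRenderGroupA ((i, v), [])] = [pvFlushB v v]
    simp [render_eq_flush, List.getLastD]
  | cons y ys =>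
    rw [PySem.List.enumerate_cons]
    obtain ⟨t, rest, hgs⟩ := groupAdjA_cons (i + 1, y) (PySem.List.enumerate ys (i + 1 + 1))
    rw [groupAdjA_cons_cons i v _ _ t rest hgs]
    by_cases hy : y = v + 1
    · have hk : (i : Int) - v = (i + 1) - y := by omega
      rw [if_pos hk, hgs, pvFlushInto, if_pos (show ((i + 1 : Int), y).2 = v + 1 from hy)]
      simp only [pvMapRender, List.map_cons, render_eq_flush, getLastD_cons']
    · have hk : ¬ ((i : Int) - v = (i + 1) - y) := by omega
      rw [if_neg hk, hgs, pvFlushInto, if_neg (show ¬ ((i + 1 : Int), y).2 = v + 1 from hy)]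
      simp only [pvMapRender, List.map_cons, render_eq_flush]
      simp [pvFlushB]

-- lemma M: B's single pass equals A's rendering with the current run carried along
theorem runsB_eq_flushInto (xs : List Int) (i start prev : Int) :
    pvRunsB start prev xs = pvFlushInto start prev (pvGroupAdjA (PySem.List.enumerate xs i)) := by
  induction xs generalizing i start prev with
  | nil => simp [pvRunsB, PySem.List.enumerate_nil, pvGroupAdjA, pvFlushInto]
  | cons x xs ih =>
    rw [PySem.List.enumerate_cons]
    by_cases hx : x = prev + 1
    · subst hx
      rw [show pvRunsB start prev ((prev + 1) :: xs) = pvRunsB start (prev + 1) xs from by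
        simp [pvRunsB]]
      rw [ih (i + 1)]
      cases xs with
      | nil =>
        rw [PySem.List.enumerate_nil]
        show pvFlushInto start (prev + 1) [] =
          pvFlushInto start prev (pvGroupAdjA [(i, prev + 1)])
        show [pvFlushB start (prev + 1)] =
          pvFlushInto start prev [((i, prev + 1), [])]
        rw [pvFlushInto, if_pos rfl]
        simp [pvMapRender]
      | cons y ys =>
        rw [PySem.List.enumerate_cons]
        obtain ⟨t, rest, hgs⟩ := groupAdjA_cons (i + 1, y) (PySem.List.enumerate ys (i + 1 + 1))
        rw [groupAdjA_cons_cons i (prev + 1) _ _ t rest hgs, hgs]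
        by_cases hy : y = prev + 1 + 1
        · have hk : (i : Int) - (prev + 1) = (i + 1) - y := by omega
          rw [if_pos hk]
          rw [pvFlushInto, if_pos (show ((i + 1 : Int), y).2 = prev + 1 + 1 from hy)]
          rw [pvFlushInto, if_pos (show ((i : Int), prev + 1).2 = prev + 1 from rfl)]
          rw [getLastD_cons']
        · have hk : ¬ ((i : Int) - (prev + 1) = (i + 1) - y) := by omega
          rw [if_neg hk]
          rw [pvFlushInto, if_neg (show ¬ ((i + 1 : Int), y).2 = prev + 1 + 1 from hy)]
          rw [pvFlushInto, if_pos (show ((i : Int), prev + 1).2 = prev + 1 from rfl)]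
          simp [pvMapRender]
    · rw [show pvRunsB start prev (x :: xs) = pvFlushB start prev :: pvRunsB x x xs from by
        simp [pvRunsB, hx]]
      rw [ih (i + 1)]
      obtain ⟨t, rest, hgs⟩ := groupAdjA_cons (i, x) (PySem.List.enumerate xs (i + 1))
      rw [hgs, pvFlushInto, if_neg (show ¬ ((i : Int), x).2 = prev + 1 from hx)]
      rw [← hgs, mapRender_groupAdj_cons]

theorem items_eq (var : List String) (group_numbers : Bool) :
    (if group_numbers then pvGroupNumberRanges var else var) =
      (if group_numbers && decide (2 ≤ var.length) && var.all PySem.Str.strIsdigit then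
        match var.map (fun s => (PySem.Int.ofStr? s).getD 0) with
        | [] => ([] : List String)
        | x :: rest => pvRunsB x x rest
      else var) := by
  cases group_numbers with
  | false => simp
  | true =>
    simp only [Bool.true_and, if_true]
    by_cases hlen : 2 ≤ var.length
    · by_cases hall : var.all PySem.Str.strIsdigit
      · have hguard : ¬ (var.length < 2 ∨
            (var.filter (fun s => !PySem.Str.strIsdigit s)).length ≠ 0) := by
          simp only [List.all_eq_true] at hall
          push Not
          refine ⟨by omega, ?_⟩
          simp only [List.length_eq_zero_iff, List.filter_eq_nil_iff]
          intro s hs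
          simpa using hall s hs
        rw [pvGroupNumberRanges, if_neg hguard]
        simp only [hlen, hall, decide_true, Bool.and_true, if_true]
        cases hm : var.map (fun s => (PySem.Int.ofStr? s).getD 0) with
        | nil =>
          have := congrArg List.length hm
          simp only [List.length_map, List.length_nil] at this
          omega
        | cons x rest =>
          show pvMapRender (pvGroupAdjA (PySem.List.enumerate (x :: rest) 0)) = pvRunsB x x rest
          rw [show PySem.List.enumerate (x :: rest) 0 =
            (0, x) :: PySem.List.enumerate rest (0 + 1) from PySem.List.enumerate_cons _ _ _]
          rw [mapRender_groupAdj_cons rest 0 x, ← runsB_eq_flushInto rest (0 + 1) x x]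
      · have hguard : var.length < 2 ∨
            (var.filter (fun s => !PySem.Str.strIsdigit s)).length ≠ 0 := by
          right
          simp only [List.all_eq_true] at hall
          push Not at hall
          obtain ⟨s, hs, hds⟩ := hall
          simp only [ne_eq, List.length_eq_zero_iff, List.filter_eq_nil_iff]
          push Not
          refine ⟨s, hs, ?_⟩
          simp only [Bool.not_eq_true] at hds
          simpa using hds
        rw [pvGroupNumberRanges, if_pos hguard]
        simp [hall]
    · rw [pvGroupNumberRanges, if_pos (Or.inl (by omega))]
      simp [hlen]

theorem tail_eq (t : String) :
    (if PySem.Str.len (PySem.Str.strip t) = 0 then " - " else t) =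
      (if PySem.Str.strip t ≠ "" then t else " - ") := by
  by_cases h : PySem.Str.strip t = ""
  · rw [if_pos (by simp [PySem.Str.len, h]), if_neg (by simp [h])]
  · have hne : (PySem.Str.strip t).toList ≠ [] :=
      fun hc => h (String.toList_eq_nil_iff.mp hc)
    rw [if_neg (by simpa [PySem.Str.len, PySem.Chars.len, List.length_eq_zero_iff] using hne),
      if_pos h]

-- ===== VERDICT (by name: the statement is the Claim_ definition above) =====
theorem check_make_list_into_text_spec : Claim_equal_check_make_list_into_text := by
  intro var group_numbers _
  unfold Spec_check_make_list_into_text check_make_list_into_text check_make_list_into_text_alt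
  rw [items_eq var group_numbers]
  exact tail_eq _
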